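-- pv_equiv track=rewrite | github.com/SebasJavierR/Python3 | Juego.py | convinar
-- ===== SOURCE A (Python) =====
-- def esta_en_serp(serpiente,i,j):
--     """recive la serpiente y dos cordenadas y juzga si son iguales a alguna
--     de las ubicaciones en las que esta la serpiente
--     """
--     for v in range(len(serpiente)):
--         if serpiente[v][0] == i and serpiente[v][-1] == j:
--             return True
--     return False
--
-- def convinar(tablero,fruta,serpiente):
--     """ Esta funcion convina la fruta la serpiente en un matriz de las dimenciones
--     indicadas por tablero, devuelve la matriz resultante
--     """
--     matriz = []
--     for i in range(tablero[0]): #filas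
--         fila = []
--         for j in range(tablero[-1]): #columnas
--             if esta_en_serp(serpiente,i,j):
--                 fila.append("#")
--             elif fruta[0] == i and fruta[-1] == j:
--                 fila.append("*")
--             else:
--                 fila.append(" ")
--         matriz.append(fila)
--     return matriz
-- ===== SOURCE B (Python) =====
-- def convinar(tablero, fruta, serpiente):
--     rows = tablero[0]
--     cols = tablero[-1]
--     grid = [[" "] * cols for _ in range(rows)]
--     fi = fruta[0]
--     fj = fruta[-1]
--     if 0 <= fi < rows and 0 <= fj < cols:
--         grid[fi][fj] = "*"
--     for v in serpiente:
--         i = v[0]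
--         j = v[-1]
--         if 0 <= i < rows and 0 <= j < cols:
--             grid[i][j] = "#"
--     return grid
-- ===== Notes on version B (the rewrite author's own statement) =====
-- stated objective: alternative
-- what changed: A scans the whole snake once per cell (triple loop); B allocates the R*C grid pre-filled with ' ' and then writes the fruit and each in-bounds snake segment directly, one write per segment.
-- outside the precondition, e.g. on convinar([0], [], []): A returns [], B raises IndexError; on convinar([1, 1], [5, 5], [[0, 0], []]): A returns [['#']], B raises IndexError
import Mathlib
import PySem

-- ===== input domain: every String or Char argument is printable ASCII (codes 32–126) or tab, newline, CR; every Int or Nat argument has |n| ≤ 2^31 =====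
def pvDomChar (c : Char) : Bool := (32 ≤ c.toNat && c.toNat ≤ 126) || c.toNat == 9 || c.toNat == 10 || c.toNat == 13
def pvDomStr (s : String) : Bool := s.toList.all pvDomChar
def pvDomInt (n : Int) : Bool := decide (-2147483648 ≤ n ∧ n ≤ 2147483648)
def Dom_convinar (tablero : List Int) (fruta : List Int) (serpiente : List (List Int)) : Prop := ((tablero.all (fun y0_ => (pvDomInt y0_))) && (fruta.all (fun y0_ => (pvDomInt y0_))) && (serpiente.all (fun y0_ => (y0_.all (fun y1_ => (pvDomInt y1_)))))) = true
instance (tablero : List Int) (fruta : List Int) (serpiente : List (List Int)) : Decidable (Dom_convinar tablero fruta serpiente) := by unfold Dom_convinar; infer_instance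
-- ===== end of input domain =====

-- ===== PORT A =====
-- B replaces A's per-cell snake scan by direct writes into a pre-filled grid (one write per segment).
-- NOTE on A's loop: 'for v in range(len(serpiente)): serpiente[v]' visits the elements in order = List.any.
def esta_en_serp (serpiente : List (List Int)) (i j : Int) : Bool :=
  serpiente.any (fun v =>
    ((PySem.List.pyGet? v 0).getD 0 == i) && ((PySem.List.pyGet? v (-1)).getD 0 == j))

def convinar (tablero : List Int) (fruta : List Int) (serpiente : List (List Int)) : List (List String) :=
  (PySem.List.pyRange 0 ((PySem.List.pyGet? tablero 0).getD 0) 1).map (fun i =>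
    (PySem.List.pyRange 0 ((PySem.List.pyGet? tablero (-1)).getD 0) 1).map (fun j =>
      if esta_en_serp serpiente i j then "#"
      else if ((PySem.List.pyGet? fruta 0).getD 0 == i) && ((PySem.List.pyGet? fruta (-1)).getD 0 == j) then "*"
      else " "))

-- ===== PORT B =====
-- grid[i][j] = c  (in-bounds write; bounds are guarded at every call site, like Source B)
def setCell : List (List String) → Nat → Nat → String → List (List String)
  | [], _, _, _ => []
  | r :: rs, 0, j, c => r.set j c :: rs
  | r :: rs, i+1, j, c => r :: setCell rs i j c

def convinar_alt (tablero : List Int) (fruta : List Int) (serpiente : List (List Int)) : List (List String) :=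
  let rows := (PySem.List.pyGet? tablero 0).getD 0
  let cols := (PySem.List.pyGet? tablero (-1)).getD 0
  let grid0 := (PySem.List.pyRange 0 rows 1).map (fun _ => PySem.List.pyRepeat [" "] cols)
  let fi := (PySem.List.pyGet? fruta 0).getD 0
  let fj := (PySem.List.pyGet? fruta (-1)).getD 0
  let grid1 := if 0 ≤ fi ∧ fi < rows ∧ 0 ≤ fj ∧ fj < cols then setCell grid0 fi.toNat fj.toNat "*" else grid0
  serpiente.foldl (fun g v =>
    let i := (PySem.List.pyGet? v 0).getD 0
    let j := (PySem.List.pyGet? v (-1)).getD 0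
    if 0 ≤ i ∧ i < rows ∧ 0 ≤ j ∧ j < cols then setCell g i.toNat j.toNat "#" else g) grid1

-- ===== PRECONDITION & SPEC =====
-- Pre_ excludes the inputs on which Python A raises IndexError (empty tablero; empty fruta;
-- an empty snake segment). It also excludes a few degenerate inputs where A happens to return
-- (empty fruta with a zero-size grid; an empty segment shadowed by an earlier matching segment):
-- there B itself raises, since it reads fruta[0] and every segment unconditionally.
def Pre_convinar (tablero : List Int) (fruta : List Int) (serpiente : List (List Int)) : Prop :=
  tablero ≠ [] ∧ fruta ≠ [] ∧ ∀ v ∈ serpiente, v ≠ []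
instance (tablero : List Int) (fruta : List Int) (serpiente : List (List Int)) : Decidable (Pre_convinar tablero fruta serpiente) := by unfold Pre_convinar; infer_instance

def pvWitness_convinar : List Int × List Int × List (List Int) := ([3, 4], [1, 2], [[0, 0], [0, 1]])

def Spec_convinar (tablero : List Int) (fruta : List Int) (serpiente : List (List Int)) (out : List (List String)) : Prop := out = convinar_alt tablero fruta serpiente
instance (tablero : List Int) (fruta : List Int) (serpiente : List (List Int)) (out : List (List String)) : Decidable (Spec_convinar tablero fruta serpiente out) := by unfold Spec_convinar; infer_instance

-- ===== CLAIM (what is proved, stated in full; the proofs are below) =====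
def Claim_equal_convinar : Prop := ∀ (tablero : List Int) (fruta : List Int) (serpiente : List (List Int)), Dom_convinar tablero fruta serpiente → Pre_convinar tablero fruta serpiente → Spec_convinar tablero fruta serpiente (convinar tablero fruta serpiente)

-- ===== LEMMAS AND PROOFS =====

-- the cell of a grid at (i, j), none when out of range
def cellOf (g : List (List String)) (i j : Nat) : Option String :=
  g[i]?.bind (fun r => r[j]?)

theorem cellOf_nil (i j : Nat) : cellOf [] i j = none := rfl

theorem cellOf_cons_zero (r : List String) (rs : List (List String)) (j : Nat) :
    cellOf (r :: rs) 0 j = r[j]? := rfl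

theorem cellOf_cons_succ (r : List String) (rs : List (List String)) (i j : Nat) :
    cellOf (r :: rs) (i+1) j = cellOf rs i j := rfl

theorem setCell_map_length (g : List (List String)) (a b : Nat) (c : String) :
    (setCell g a b c).map List.length = g.map List.length := by
  induction g generalizing a with
  | nil => rfl
  | cons r rs ih =>
    cases a with
    | zero => simp [setCell]
    | succ a => simp [setCell, ih]

theorem cellOf_setCell (g : List (List String)) (a b : Nat) (c : String) (i j : Nat) :
    cellOf (setCell g a b c) i j =
      if a = i ∧ b = j then (cellOf g i j).map (fun _ => c) else cellOf g i j := by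
  induction g generalizing a i with
  | nil => simp [setCell, cellOf_nil]
  | cons r rs ih =>
    cases a with
    | zero =>
      cases i with
      | zero =>
        simp only [setCell, cellOf_cons_zero, List.getElem?_set']
        by_cases hb : b = j
        · simp [hb]; cases r[j]? <;> rfl
        · simp [hb]
      | succ i => simp [setCell, cellOf_cons_succ]
    | succ a =>
      cases i with
      | zero => simp [setCell, cellOf_cons_zero]
      | succ i => simpa [setCell, cellOf_cons_succ] using ih a i

-- if two grids have the same row lengths and the same cells, they are equal
theorem grid_eq_of_cellOf (g1 g2 : List (List String))
    (hlen : g1.map List.length = g2.map List.length)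
    (hc : ∀ i j, cellOf g1 i j = cellOf g2 i j) : g1 = g2 := by
  induction g1 generalizing g2 with
  | nil => cases g2 with
    | nil => rfl
    | cons r2 t2 => simp at hlen
  | cons r1 t1 ih =>
    cases g2 with
    | nil => simp at hlen
    | cons r2 t2 =>
      simp only [List.map_cons, List.cons.injEq] at hlen
      have hr : r1 = r2 := by
        apply List.ext_getElem?
        intro j
        simpa [cellOf_cons_zero] using hc 0 j
      have ht : t1 = t2 := by
        refine ih t2 hlen.2 (fun i j => ?_)
        simpa [cellOf_cons_succ] using hc (i+1) j
      rw [hr, ht]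

-- the snake fold, characterised cell by cell
theorem cellOf_snake_foldl (rows cols : Int) (l : List (List Int)) (g : List (List String)) (i j : Nat) :
    cellOf (l.foldl (fun g v =>
      let a := (PySem.List.pyGet? v 0).getD 0
      let b := (PySem.List.pyGet? v (-1)).getD 0
      if 0 ≤ a ∧ a < rows ∧ 0 ≤ b ∧ b < cols then setCell g a.toNat b.toNat "#" else g) g) i j =
    if l.any (fun v =>
        let a := (PySem.List.pyGet? v 0).getD 0
        let b := (PySem.List.pyGet? v (-1)).getD 0
        decide ((0 ≤ a ∧ a < rows ∧ 0 ≤ b ∧ b < cols) ∧ a.toNat = i ∧ b.toNat = j)) then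
      (cellOf g i j).map (fun _ => "#")
    else cellOf g i j := by
  induction l generalizing g with
  | nil => simp
  | cons v l ih =>
    simp only [List.foldl_cons, List.any_cons, ih]
    by_cases hg : 0 ≤ (PySem.List.pyGet? v 0).getD 0 ∧ (PySem.List.pyGet? v 0).getD 0 < rows ∧
        0 ≤ (PySem.List.pyGet? v (-1)).getD 0 ∧ (PySem.List.pyGet? v (-1)).getD 0 < cols
    · by_cases hij : ((PySem.List.pyGet? v 0).getD 0).toNat = i ∧ ((PySem.List.pyGet? v (-1)).getD 0).toNat = j
      · simp [hg, hij, cellOf_setCell, Option.map_map, Function.comp_def]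
      · have : ¬ ((((PySem.List.pyGet? v 0).getD 0).toNat = i) ∧ (((PySem.List.pyGet? v (-1)).getD 0).toNat = j)) := hij
        simp [hg, cellOf_setCell, hij]
    · simp [hg]

theorem snake_foldl_map_length (rows cols : Int) (l : List (List Int)) (g : List (List String)) :
    (l.foldl (fun g v =>
      let a := (PySem.List.pyGet? v 0).getD 0
      let b := (PySem.List.pyGet? v (-1)).getD 0
      if 0 ≤ a ∧ a < rows ∧ 0 ≤ b ∧ b < cols then setCell g a.toNat b.toNat "#" else g) g).map List.length
      = g.map List.length := by
  induction l generalizing g with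
  | nil => rfl
  | cons v l ih =>
    simp only [List.foldl_cons]
    rw [ih]
    split
    · exact setCell_map_length ..
    · rfl

-- cell (i, j) of A's comprehension grid
theorem cellOf_gridA (R C : Int) (f : Int → Int → String) (i j : Nat) :
    cellOf ((PySem.List.pyRange 0 R 1).map (fun a => (PySem.List.pyRange 0 C 1).map (fun b => f a b))) i j
      = if i < R.toNat ∧ j < C.toNat then some (f i j) else none := by
  unfold cellOf
  rw [List.getElem?_map, PySem.List.getElem?_pyRange_one]
  by_cases hi : i < R.toNat
  · rw [if_pos (by omega : i < (R - 0).toNat)]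
    simp only [Option.map_some, Option.bind_some, List.getElem?_map, PySem.List.getElem?_pyRange_one]
    by_cases hj : j < C.toNat
    · rw [if_pos (by omega : j < (C - 0).toNat)]
      simp [hi, hj]
    · rw [if_neg (by omega : ¬ j < (C - 0).toNat)]
      simp [hj]
  · rw [if_neg (by omega : ¬ i < (R - 0).toNat)]
    simp [hi]

-- cell (i, j) of B's pre-filled grid
theorem cellOf_grid0 (R C : Int) (i j : Nat) :
    cellOf ((PySem.List.pyRange 0 R 1).map (fun _ => PySem.List.pyRepeat [" "] C)) i j
      = if i < R.toNat ∧ j < C.toNat then some " " else none := by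
  unfold cellOf
  rw [List.getElem?_map, PySem.List.getElem?_pyRange_one, PySem.List.pyRepeat_singleton]
  by_cases hi : i < R.toNat
  · rw [if_pos (by omega : i < (R - 0).toNat)]
    by_cases hj : j < C.toNat <;> simp [hi, hj]
  · rw [if_neg (by omega : ¬ i < (R - 0).toNat)]
    simp [hi]

-- cell (i, j) after the fruit write
theorem cellOf_fruit (g : List (List String)) (G : Prop) [Decidable G] (a b : Nat) (i j : Nat) :
    cellOf (if G then setCell g a b "*" else g) i j
      = if G ∧ a = i ∧ b = j then (cellOf g i j).map (fun _ => "*") else cellOf g i j := by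
  by_cases hG : G
  · rw [if_pos hG, cellOf_setCell]
    by_cases hF : a = i ∧ b = j <;> simp [hF, hG]
  · simp [hG]

-- the whole equivalence, with the scalar inputs abstracted
theorem core_eq (R C fi fj : Int) (serpiente : List (List Int)) :
    (PySem.List.pyRange 0 R 1).map (fun i =>
      (PySem.List.pyRange 0 C 1).map (fun j =>
        if esta_en_serp serpiente i j then "#"
        else if (fi == i) && (fj == j) then "*"
        else " "))
    = serpiente.foldl (fun g v =>
        let a := (PySem.List.pyGet? v 0).getD 0
        let b := (PySem.List.pyGet? v (-1)).getD 0
        if 0 ≤ a ∧ a < R ∧ 0 ≤ b ∧ b < C then setCell g a.toNat b.toNat "#" else g)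
      (if 0 ≤ fi ∧ fi < R ∧ 0 ≤ fj ∧ fj < C
        then setCell ((PySem.List.pyRange 0 R 1).map (fun _ => PySem.List.pyRepeat [" "] C)) fi.toNat fj.toNat "*"
        else (PySem.List.pyRange 0 R 1).map (fun _ => PySem.List.pyRepeat [" "] C)) := by
  apply grid_eq_of_cellOf
  · rw [snake_foldl_map_length]
    have h1 : ∀ gr : List (List String), gr = (if 0 ≤ fi ∧ fi < R ∧ 0 ≤ fj ∧ fj < C
        then setCell ((PySem.List.pyRange 0 R 1).map (fun _ => PySem.List.pyRepeat [" "] C)) fi.toNat fj.toNat "*"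
        else (PySem.List.pyRange 0 R 1).map (fun _ => PySem.List.pyRepeat [" "] C)) →
        gr.map List.length = (PySem.List.pyRange 0 R 1).map (fun _ => C.toNat) := by
      intro gr hgr
      rw [hgr]
      split
      · rw [setCell_map_length]
        simp [PySem.List.pyRepeat_singleton]
      · simp [PySem.List.pyRepeat_singleton]
    rw [h1 _ rfl]
    simp [List.map_map, Function.comp_def, PySem.List.length_pyRange_one]
  · intro i j
    rw [cellOf_gridA, cellOf_snake_foldl, cellOf_fruit, cellOf_grid0]
    by_cases hin : i < R.toNat ∧ j < C.toNat
    · rw [if_pos hin]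
      have hiR : 0 ≤ (i : Int) ∧ (i : Int) < R := by omega
      have hjC : 0 ≤ (j : Int) ∧ (j : Int) < C := by omega
      have hsnake : (serpiente.any (fun v =>
          let a := (PySem.List.pyGet? v 0).getD 0
          let b := (PySem.List.pyGet? v (-1)).getD 0
          decide ((0 ≤ a ∧ a < R ∧ 0 ≤ b ∧ b < C) ∧ a.toNat = i ∧ b.toNat = j)))
          = esta_en_serp serpiente (i : Int) (j : Int) := by
        unfold esta_en_serp
        rw [Bool.eq_iff_iff]
        simp only [List.any_eq_true, decide_eq_true_iff, Bool.and_eq_true, beq_iff_eq]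
        constructor
        · rintro ⟨v, hv, ⟨_, h1, h2⟩⟩
          exact ⟨v, hv, by omega, by omega⟩
        · rintro ⟨v, hv, h1, h2⟩
          refine ⟨v, hv, ⟨⟨?_, ?_, ?_, ?_⟩, ?_, ?_⟩⟩ <;> omega
      have hfruit : ((0 ≤ fi ∧ fi < R ∧ 0 ≤ fj ∧ fj < C) ∧ fi.toNat = i ∧ fj.toNat = j)
          ↔ (fi = (i : Int) ∧ fj = (j : Int)) := by
        constructor
        · rintro ⟨_, h1, h2⟩; constructor <;> omega
        · rintro ⟨h1, h2⟩
          refine ⟨⟨?_, ?_, ?_, ?_⟩, ?_, ?_⟩ <;> omega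
      rw [hsnake]
      cases hE : esta_en_serp serpiente (i : Int) (j : Int)
      · simp only [Bool.false_eq_true, if_false]
        by_cases hf : fi = (i : Int) ∧ fj = (j : Int)
        · rw [if_pos hin, if_pos (hfruit.mpr hf)]
          simp [hf.1, hf.2]
        · rw [if_pos hin, if_neg (fun h => hf (hfruit.mp h))]
          have : ((fi == (i : Int)) && (fj == (j : Int))) = false := by
            simp only [Bool.and_eq_false_iff, beq_eq_false_iff_ne, ne_eq]
            by_cases h1 : fi = (i : Int)
            · right; intro h2; exact hf ⟨h1, h2⟩
            · left; exact h1
          rw [this]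
          simp
      · rw [if_pos hin]
        by_cases hf : (0 ≤ fi ∧ fi < R ∧ 0 ≤ fj ∧ fj < C) ∧ fi.toNat = i ∧ fj.toNat = j <;>
          simp [hf]
    · rw [if_neg hin]
      split <;> split <;> simp

theorem convinar_eq_alt (tablero : List Int) (fruta : List Int) (serpiente : List (List Int)) :
    convinar tablero fruta serpiente = convinar_alt tablero fruta serpiente := by
  simp only [convinar, convinar_alt]
  exact core_eq _ _ _ _ serpiente

-- ===== VERDICT (by name: the statement is the Claim_ definition above) =====
theorem convinar_spec : Claim_equal_convinar := by
  intro tablero fruta serpiente _ _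
  unfold Spec_convinar
  exact convinar_eq_alt tablero fruta serpiente
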